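-- pv_equiv track=rewrite | github.com/khyunchoi/TIL | record_of_the_day/220407/test4.py | solution
-- ===== SOURCE A (Python) =====
-- def solution(arr, brr):
--     answer = 0
--     tmp_arr = []
--
--     tmp = 0
--     for i in range(len(arr)):
--         tmp += arr[i]
--         tmp_arr.append(tmp)
--
--     tmp_b = 0
--     for i in range(len(brr)):
--         tmp_b += brr[i]
--         if tmp_arr[i] != tmp_b:
--             answer += 1
--
--     return answer
-- ===== SOURCE B (Python) =====
-- def solution(arr, brr):
--     # Divide and conquer: go(lo, hi, base) counts positions i in [lo, hi) whose
--     # prefix-sum difference is nonzero, given base = prefix difference before lo,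
--     # and also returns the segment's difference sum so the right half gets its base.
--     def go(lo, hi, base):
--         if hi - lo == 1:
--             d = arr[lo] - brr[lo]
--             return ((1 if base + d != 0 else 0), d)
--         mid = (lo + hi) // 2
--         c1, s1 = go(lo, mid, base)
--         c2, s2 = go(mid, hi, base + s1)
--         return (c1 + c2, s1 + s2)
--     if not brr:
--         return 0
--     return go(0, len(brr), 0)[0]
-- ===== Notes on version B (the rewrite author's own statement) =====
-- stated objective: alternative
-- what changed: B replaces A's two sequential index loops (prefix-sum list build, then compare) by a divide-and-conquer recursion that splits the index range in half, returns each half's (mismatch count, difference sum) and feeds the left half's difference sum as the base of the right half.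
import Mathlib
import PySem

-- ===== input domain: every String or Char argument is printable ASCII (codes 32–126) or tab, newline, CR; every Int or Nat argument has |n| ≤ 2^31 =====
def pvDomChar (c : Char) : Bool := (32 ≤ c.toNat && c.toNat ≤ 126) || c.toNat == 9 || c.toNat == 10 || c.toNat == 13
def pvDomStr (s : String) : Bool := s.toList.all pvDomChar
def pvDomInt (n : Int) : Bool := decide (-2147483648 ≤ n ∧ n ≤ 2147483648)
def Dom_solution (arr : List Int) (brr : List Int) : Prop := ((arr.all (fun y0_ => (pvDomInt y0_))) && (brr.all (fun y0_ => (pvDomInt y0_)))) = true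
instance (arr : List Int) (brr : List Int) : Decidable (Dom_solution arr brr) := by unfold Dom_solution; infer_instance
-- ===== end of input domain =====

-- B replaces A's two sequential index loops by a divide-and-conquer recursion over the
-- index range that returns (mismatch count, segment difference sum) for each half
-- (objective: alternative algorithm, O(log m) stack instead of A's O(n) prefix list).

-- ===== PORT A =====
def solution (arr : List Int) (brr : List Int) : Int :=
  -- first loop: build tmp_arr of prefix sums of arr
  let s := (List.range arr.length).foldl
    (fun (st : List Int × Int) (i : Nat) =>
      let tmp := st.2 + PySem.List.pyGetD arr (i : Int) 0
      (st.1 ++ [tmp], tmp)) ([], 0)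
  let tmp_arr := s.1
  -- second loop: running sum of brr, count mismatches against tmp_arr[i]
  let r := (List.range brr.length).foldl
    (fun (st : Int × Int) (i : Nat) =>
      let tmp_b := st.2 + PySem.List.pyGetD brr (i : Int) 0
      (if PySem.List.pyGetD tmp_arr (i : Int) 0 ≠ tmp_b then st.1 + 1 else st.1, tmp_b))
    (0, 0)
  r.1

-- ===== PORT B =====
-- go(lo, hi, base): Python recursion on the half-open index range [lo, hi);
-- the 'hi ≤ lo' guard is unreachable from the calls B makes and only makes the
-- recursion total in Lean.
def goBF (arr brr : List Int) : Nat → Nat → Nat → Int → Int × Int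
  | 0, _, _, _ => (0, 0)  -- fuel exhausted, unreachable from B's calls
  | fuel + 1, lo, hi, base =>
    if hi - lo = 1 then
      let d := PySem.List.pyGetD arr (lo : Int) 0 - PySem.List.pyGetD brr (lo : Int) 0
      ((if base + d ≠ 0 then 1 else 0), d)
    else if hi ≤ lo then (0, 0)  -- totality guard, unreachable in B's calls
    else
      let mid := (lo + hi) / 2
      let r1 := goBF arr brr fuel lo mid base
      let r2 := goBF arr brr fuel mid hi (base + r1.2)
      (r1.1 + r2.1, r1.2 + r2.2)

def solution_alt (arr : List Int) (brr : List Int) : Int :=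
  if brr = [] then 0
  else (goBF arr brr brr.length 0 brr.length 0).1

-- ===== PRECONDITION & SPEC =====
-- Pre_ excludes len(brr) > len(arr): there A raises IndexError on tmp_arr[i] (and B on arr[lo]).
def Pre_solution (arr : List Int) (brr : List Int) : Prop := brr.length ≤ arr.length
instance (arr : List Int) (brr : List Int) : Decidable (Pre_solution arr brr) := by unfold Pre_solution; infer_instance
def pvWitness_solution : List Int × List Int := ([1, 2, 3], [1, 5])

def Spec_solution (arr : List Int) (brr : List Int) (out : Int) : Prop := out = solution_alt arr brr
instance (arr : List Int) (brr : List Int) (out : Int) : Decidable (Spec_solution arr brr out) := by unfold Spec_solution; infer_instance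

-- ===== CLAIM (what is proved, stated in full; the proofs are below) =====
def Claim_equal_solution : Prop := ∀ (arr : List Int) (brr : List Int), Dom_solution arr brr → Pre_solution arr brr → Spec_solution arr brr (solution arr brr)

-- ===== LEMMAS AND PROOFS =====

-- prefix-sum difference
def pdiff (arr brr : List Int) (i : Nat) : Int := (arr.take i).sum - (brr.take i).sum

lemma sum_take_succ_getD (xs : List Int) (n : Nat) :
    (xs.take (n + 1)).sum = (xs.take n).sum + xs.getD n 0 := by
  rw [List.take_add_one, List.sum_append]
  cases h : xs[n]? <;> simp [List.getD, h]

lemma buildA (xs : List Int) (n : Nat) :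
    (List.range n).foldl
      (fun (st : List Int × Int) (i : Nat) =>
        let tmp := st.2 + PySem.List.pyGetD xs (i : Int) 0
        (st.1 ++ [tmp], tmp)) ([], 0)
    = ((List.range n).map (fun i => (xs.take (i + 1)).sum), (xs.take n).sum) := by
  induction n with
  | zero => simp
  | succ n ih =>
      rw [List.range_succ, List.foldl_append, ih]
      simp [sum_take_succ_getD]

-- A's second loop computes the mismatch count and the running brr prefix sum.
lemma loopA (arr brr : List Int) (h : brr.length ≤ arr.length) (n : Nat) (hn : n ≤ brr.length) :
    (List.range n).foldl
      (fun (st : Int × Int) (i : Nat) =>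
        let tmp_b := st.2 + PySem.List.pyGetD brr (i : Int) 0
        (if PySem.List.pyGetD ((List.range arr.length).map (fun j => (arr.take (j + 1)).sum)) (i : Int) 0 ≠ tmp_b
          then st.1 + 1 else st.1, tmp_b)) (0, 0)
    = ((((List.range n).filter (fun i => decide (pdiff arr brr (i + 1) ≠ 0))).length : Int),
       (brr.take n).sum) := by
  induction n with
  | zero => simp
  | succ n ih =>
      have hn' : n ≤ brr.length := Nat.le_of_succ_le hn
      have hlt : n < brr.length := hn
      have hlta : n < arr.length := Nat.lt_of_lt_of_le hlt h
      have hidx : PySem.List.pyGetD ((List.range arr.length).map (fun j => (arr.take (j + 1)).sum)) (n : Int) 0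
          = (arr.take (n + 1)).sum := by
        rw [PySem.List.pyGetD_natCast]
        rw [List.getD_eq_getElem _ _ (by simpa using hlta)]
        simp
      rw [List.range_succ, List.foldl_append, ih hn', List.filter_append, List.length_append]
      simp only [List.foldl_cons, List.foldl_nil, List.filter_cons, List.filter_nil]
      rw [hidx, PySem.List.pyGetD_natCast, sum_take_succ_getD brr n]
      have hiff : (arr.take (n + 1)).sum ≠ (brr.take n).sum + brr.getD n 0
          ↔ pdiff arr brr (n + 1) ≠ 0 := by
        unfold pdiff
        rw [sum_take_succ_getD brr n]
        constructor <;> intro hne heq <;> apply hne <;> omega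
      by_cases hc : pdiff arr brr (n + 1) ≠ 0
      · rw [if_pos (hiff.mpr hc)]
        simp [hc]
      · rw [if_neg (fun hx => hc (hiff.mp hx))]
        simp [hc]

-- goBF with enough fuel on [lo, hi), started at base = pdiff lo, returns the mismatch
-- count of the segment and the segment's difference sum.
lemma goBF_spec (arr brr : List Int) (h : brr.length ≤ arr.length) :
    ∀ fuel lo hi, hi - lo ≤ fuel → lo < hi → hi ≤ brr.length →
    goBF arr brr fuel lo hi (pdiff arr brr lo)
      = ((((List.range' lo (hi - lo)).filter (fun i => decide (pdiff arr brr (i + 1) ≠ 0))).length : Int),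
         pdiff arr brr hi - pdiff arr brr lo) := by
  intro fuel
  induction fuel with
  | zero => intro lo hi hf hlt _; omega
  | succ fuel ih =>
    intro lo hi hf hlt hhi
    by_cases h1 : hi - lo = 1
    · -- base case: one-element segment
      have hhi' : hi = lo + 1 := by omega
      have hloB : lo < brr.length := by omega
      have hloA : lo < arr.length := Nat.lt_of_lt_of_le hloB h
      rw [goBF, if_pos h1]
      subst hhi'
      simp only [PySem.List.pyGetD_natCast]
      have hA := sum_take_succ_getD arr lo
      have hB := sum_take_succ_getD brr lo
      have hd : pdiff arr brr lo + (arr.getD lo 0 - brr.getD lo 0) = pdiff arr brr (lo + 1) := by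
        unfold pdiff; rw [hA, hB]; ring
      have h2 : pdiff arr brr (lo + 1) - pdiff arr brr lo = arr.getD lo 0 - brr.getD lo 0 := by
        unfold pdiff; rw [hA, hB]; ring
      rw [hd, h2]
      by_cases hc : pdiff arr brr (lo + 1) ≠ 0
      · rw [if_pos hc]; simp [hc]
      · rw [if_neg hc]; simp [hc]
    · -- split
      have h2 : 2 ≤ hi - lo := by omega
      rw [goBF, if_neg h1, if_neg (by omega)]
      have hmid1 : lo < (lo + hi) / 2 := by omega
      have hmid2 : (lo + hi) / 2 < hi := by omega
      have e1 := ih lo ((lo + hi) / 2) (by omega) hmid1 (by omega)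
      have e2 := ih ((lo + hi) / 2) hi (by omega) hmid2 hhi
      simp only [e1]
      have hbase : pdiff arr brr lo + (pdiff arr brr ((lo + hi) / 2) - pdiff arr brr lo)
          = pdiff arr brr ((lo + hi) / 2) := by ring
      rw [hbase, e2]
      have hsplit : List.range' lo (hi - lo)
          = List.range' lo ((lo + hi) / 2 - lo) ++ List.range' ((lo + hi) / 2) (hi - (lo + hi) / 2) := by
        have hm : lo + 1 * ((lo + hi) / 2 - lo) = (lo + hi) / 2 := by omega
        rw [show hi - lo = ((lo + hi) / 2 - lo) + (hi - (lo + hi) / 2) from by omega,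
          ← List.range'_append, hm]
      rw [hsplit, List.filter_append, List.length_append]
      simp only [Prod.mk.injEq]
      constructor
      · push_cast; ring
      · ring

-- ===== VERDICT (by name: the statement is the Claim_ definition above) =====
theorem solution_spec : Claim_equal_solution := by
  intro arr brr _ hpre
  unfold Spec_solution solution solution_alt
  by_cases hb : brr = []
  · subst hb; simp
  · rw [if_neg hb]
    have hn : 0 < brr.length := List.length_pos_iff.mpr hb
    simp only [buildA]
    rw [loopA arr brr hpre brr.length le_rfl]
    have h0 : pdiff arr brr 0 = 0 := by unfold pdiff; simp
    have := goBF_spec arr brr hpre brr.length 0 brr.length (by omega) hn le_rfl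
    rw [h0] at this
    rw [this]
    rw [List.range_eq_range']
    simp
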